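-- pv_equiv track=rewrite | github.com/evpowerenergy/evp-ai-assistant | backend/app/core/permissions.py | filter_by_role
-- ===== SOURCE A (Python) =====
-- from typing import Dict, Any, List
--
-- def filter_by_role(data: Any, user_role: str) -> Any:
--     """
--     Filter data based on user role
--     Removes sensitive fields for lower roles
--     """
--     if not isinstance(data, dict):
--         return data
--
--     filtered = data.copy()
--
--     # Remove sensitive fields for non-admin users
--     if user_role != "admin":
--         sensitive_fields = [
--             "service_role_key",
--             "api_key",
--             "secret",
--             "password",
--             "token"
--         ]
--
--         for field in sensitive_fields:
--             filtered.pop(field, None)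
--
--     return filtered
-- ===== SOURCE B (Python) =====
-- from typing import Any
--
-- SENSITIVE = frozenset({"service_role_key", "api_key", "secret", "password", "token"})
--
-- def filter_by_role(data: Any, user_role: str) -> Any:
--     if not isinstance(data, dict):
--         return data
--     if user_role == "admin":
--         return dict(data)
--     out = {}
--     for key, value in data.items():
--         if key not in SENSITIVE:
--             out[key] = value
--     return out
-- ===== Notes on version B (the rewrite author's own statement) =====
-- stated objective: alternative
-- what changed: Instead of copying the dict and popping each of the five blacklisted keys out of the copy, B early-returns a copy for admins and otherwise builds a fresh dict from empty in one loop over data's own items, inserting only keys outside a frozenset blacklist; no intermediate copy is mutated.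
import Mathlib
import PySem

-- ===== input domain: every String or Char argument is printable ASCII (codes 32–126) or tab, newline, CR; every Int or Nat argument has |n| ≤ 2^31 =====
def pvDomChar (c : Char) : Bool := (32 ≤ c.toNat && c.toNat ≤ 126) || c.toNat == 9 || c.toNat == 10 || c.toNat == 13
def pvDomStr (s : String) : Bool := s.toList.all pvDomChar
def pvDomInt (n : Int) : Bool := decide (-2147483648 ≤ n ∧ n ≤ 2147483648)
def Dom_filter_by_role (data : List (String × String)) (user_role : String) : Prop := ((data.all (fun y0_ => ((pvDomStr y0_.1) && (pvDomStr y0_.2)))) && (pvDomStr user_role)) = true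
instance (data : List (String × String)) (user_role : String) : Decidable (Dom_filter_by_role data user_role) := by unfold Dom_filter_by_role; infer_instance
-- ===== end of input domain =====

-- B replaces A's copy-then-pop-five-keys with one build-up loop from an empty dict over
-- data's own items, inserting keys outside a frozenset blacklist (alternative decomposition).


-- ===== PORT A =====
-- A's data argument is a dict; the association list is read as that dict via Dict.ofList.
-- sensitive_fields, the local blacklist list of A
def sensitiveFields : List String :=
  ["service_role_key", "api_key", "secret", "password", "token"]

def filter_by_role (data : List (String × String)) (user_role : String) : List (String × String) :=
  -- 'if not isinstance(data, dict)' never fires: data is a dict by type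
  let filtered := PySem.Dict.ofList data      -- filtered = data.copy()
  if user_role ≠ "admin" then
    -- for field in sensitive_fields: filtered.pop(field, None)
    (sensitiveFields.foldl (fun d f => d.erase f) filtered).items
  else
    filtered.items

-- ===== PORT B =====
-- SENSITIVE, the module-level frozenset of B
def sensitiveSet : PySem.Set String :=
  PySem.Set.ofList ["service_role_key", "api_key", "secret", "password", "token"]

-- the 'for key, value in data.items(): if key not in SENSITIVE: out[key] = value' loop of B
def buildFiltered : List (String × String) → PySem.Dict String String → PySem.Dict String String
  | [], out => out
  | kv :: rest, out =>
      buildFiltered rest (if sensitiveSet.contains kv.1 then out else out.insert kv.1 kv.2)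

def filter_by_role_alt (data : List (String × String)) (user_role : String) : List (String × String) :=
  if user_role == "admin" then
    (PySem.Dict.ofList data).items            -- return dict(data)
  else
    (buildFiltered (PySem.Dict.ofList data).items PySem.Dict.empty).items

-- ===== PRECONDITION & SPEC =====
def Spec_filter_by_role (data : List (String × String)) (user_role : String) (out : List (String × String)) : Prop := out = filter_by_role_alt data user_role
instance (data : List (String × String)) (user_role : String) (out : List (String × String)) : Decidable (Spec_filter_by_role data user_role out) := by unfold Spec_filter_by_role; infer_instance

-- ===== CLAIM (what is proved, stated in full; the proofs are below) =====
def Claim_equal_filter_by_role : Prop := ∀ (data : List (String × String)) (user_role : String), Dom_filter_by_role data user_role → Spec_filter_by_role data user_role (filter_by_role data user_role)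

-- ===== LEMMAS AND PROOFS =====
-- erasing a key filters it out of the items list
theorem items_erase (d : PySem.Dict String String) (k : String) :
    (d.erase k).items = d.items.filter (fun p => !(p.1 == k)) := by
  simp [PySem.Dict.erase]

-- A's fold of erasures over the blacklist filters the items by non-membership in the blacklist
theorem items_foldl_erase (fields : List String) (d : PySem.Dict String String) :
    (fields.foldl (fun d f => d.erase f) d).items
      = d.items.filter (fun p => !fields.contains p.1) := by
  induction fields generalizing d with
  | nil => simp
  | cons f fs ih =>
      simp only [List.foldl_cons, ih, items_erase, List.filter_filter]
      apply List.filter_congr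
      intro p _
      by_cases h : p.1 = f <;> simp [h]

-- B's build-up loop is the fold of inserts over the kept items
theorem buildFiltered_eq_foldl (l : List (String × String)) (out : PySem.Dict String String) :
    buildFiltered l out
      = (l.filter (fun p => !sensitiveSet.contains p.1)).foldl
          (fun d p => d.insert p.1 p.2) out := by
  induction l generalizing out with
  | nil => rfl
  | cons kv rest ih =>
      by_cases h : kv.1 ∈ sensitiveSet <;>
        simp [buildFiltered, ih, PySem.Set.contains, h]

-- inserting the kept items (distinct keys, all fresh for empty) into empty appends them in order
theorem items_buildFiltered_empty (l : List (String × String)) (hnd : (l.map Prod.fst).Nodup) :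
    (buildFiltered l PySem.Dict.empty).items
      = l.filter (fun p => !sensitiveSet.contains p.1) := by
  rw [buildFiltered_eq_foldl]
  have hsub : ((l.filter (fun p => !sensitiveSet.contains p.1)).map Prod.fst).Nodup :=
    (List.Sublist.map Prod.fst (List.filter_sublist (l := l))).nodup hnd
  have := PySem.Dict.items_foldl_insert_fresh
    (l := l.filter (fun p => !sensitiveSet.contains p.1))
    (k := Prod.fst) (v := Prod.snd) (d := PySem.Dict.empty)
    (by intro a _; simp) hsub
  simpa using this

theorem filter_by_role_spec : Claim_equal_filter_by_role := by
  intro data user_role _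
  unfold Spec_filter_by_role filter_by_role filter_by_role_alt
  by_cases h : user_role = "admin"
  · simp [h]
  · have hb : (user_role == "admin") = false := by simpa using h
    have hnd : ((PySem.Dict.ofList data).items.map Prod.fst).Nodup := by
      have := PySem.Dict.nodup_keys_ofList (ps := data) (κ := String) (ν := String)
      simpa [PySem.Dict.keys] using this
    rw [if_pos (by simpa using h), if_neg (by simp [hb]),
      items_foldl_erase, items_buildFiltered_empty _ hnd]
    apply List.filter_congr
    intro p _
    simp [sensitiveSet, sensitiveFields, PySem.Set.ofList]
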